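-- pv_equiv track=rewrite | github.com/ChemBioHTP/EnzyExtract | enzyextract/utils/md_management.py | read_md_by_pmid
-- ===== SOURCE A (Python) =====
-- def read_md_by_pmid(content) -> list[int, str]:
--     # look for the pmid header, which is ## PMID:
--     result = []
--     current_pmid = None
--     current_block = None
--     lines = content.split('\n')
--
--     # current_pmid = None
--     for line in lines:
--         if line.startswith("## PMID: "):
--             if current_pmid is not None:
--                 result.append((current_pmid, current_block.strip() + '\n'))
--             current_pmid = line[len("## PMID: "):]
--             current_block = ""
--         elif current_pmid is not None:
--             current_block += line + '\n'
--     # last one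
--     if current_pmid is not None:
--         result.append((current_pmid, current_block.strip() + '\n'))
--     return result
-- ===== SOURCE B (Python) =====
-- def read_md_by_pmid(content) -> list[int, str]:
--     # Index-based scan: locate the header lines, then cut the line list into
--     # [header, body...] segments and join/strip each body in one go.
--     HEADER = "## PMID: "
--     lines = content.split('\n')
--     n = len(lines)
--     i = 0
--     while i < n and not lines[i].startswith(HEADER):
--         i += 1  # discard everything before the first header
--     result = []
--     while i < n:
--         j = i + 1
--         while j < n and not lines[j].startswith(HEADER):
--             j += 1
--         result.append((lines[i][len(HEADER):], '\n'.join(lines[i + 1:j]).strip() + '\n'))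
--         i = j
--     return result
-- ===== Notes on version B (the rewrite author's own statement) =====
-- stated objective: alternative
-- what changed: Replaces A's single stateful loop carrying current_pmid/current_block string accumulators with an index-based segment scan: find each header line, take the body as the slice of lines up to the next header, and join/strip it once per block.
import Mathlib
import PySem

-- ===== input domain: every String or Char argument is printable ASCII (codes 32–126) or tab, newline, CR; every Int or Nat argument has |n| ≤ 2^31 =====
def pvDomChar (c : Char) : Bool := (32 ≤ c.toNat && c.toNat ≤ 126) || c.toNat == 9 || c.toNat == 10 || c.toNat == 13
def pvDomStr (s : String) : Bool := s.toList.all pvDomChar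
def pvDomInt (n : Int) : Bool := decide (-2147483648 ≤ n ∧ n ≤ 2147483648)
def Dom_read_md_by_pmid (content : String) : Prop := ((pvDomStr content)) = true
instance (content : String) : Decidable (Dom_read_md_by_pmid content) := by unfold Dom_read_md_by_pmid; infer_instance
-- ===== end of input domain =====

-- B replaces A's stateful accumulator loop by an index/segment scan (same cost, plainer blocks).

-- ===== PORT A =====
-- the header prefix "## PMID: "
def pvHdr : List Char := "## PMID: ".toList

-- A's loop body: state = (result so far, current (pmid, block) if a header was seen)
def pvStepA (st : List (String × String) × Option (List Char × List Char)) (line : List Char) :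
    List (String × String) × Option (List Char × List Char) :=
  if PySem.Chars.startswith line pvHdr then
    ((match st.2 with
      | some (p, b) => st.1 ++ [(String.ofList p, String.ofList (PySem.Chars.strip b ++ ['\n']))]
      | none => st.1),
     some (PySem.List.slice line (some 9) none, []))
  else
    match st.2 with
    | some (p, b) => (st.1, some (p, b ++ line ++ ['\n']))
    | none => (st.1, none)

-- A's trailing "last one" append
def pvFlushA (st : List (String × String) × Option (List Char × List Char)) : List (String × String) :=
  match st.2 with
  | some (p, b) => st.1 ++ [(String.ofList p, String.ofList (PySem.Chars.strip b ++ ['\n']))]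
  | none => st.1

def read_md_by_pmid (content : String) : List (String × String) :=
  pvFlushA ((PySem.Chars.splitOn content.toList "\n".toList).foldl pvStepA ([], none))

-- ===== PORT B =====
-- B's inner scan: `lines` starts with a header line; body = lines up to the next header
def pvGoB : List (List Char) → List (String × String)
  | [] => []
  | l :: rest =>
    (String.ofList (PySem.List.slice l (some 9) none),
     String.ofList (PySem.Chars.strip
        (PySem.Chars.join ['\n'] (rest.takeWhile (fun x => ! PySem.Chars.startswith x pvHdr))) ++ ['\n']))
      :: pvGoB (rest.dropWhile (fun x => ! PySem.Chars.startswith x pvHdr))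
  termination_by ls => ls.length
  decreasing_by
    exact Nat.lt_succ_of_le (List.length_dropWhile_le _ _)

def read_md_by_pmid_alt (content : String) : List (String × String) :=
  pvGoB ((PySem.Chars.splitOn content.toList "\n".toList).dropWhile
           (fun l => ! PySem.Chars.startswith l pvHdr))

-- ===== PRECONDITION & SPEC =====
def Spec_read_md_by_pmid (content : String) (out : List (String × String)) : Prop := out = read_md_by_pmid_alt content
instance (content : String) (out : List (String × String)) : Decidable (Spec_read_md_by_pmid content out) := by unfold Spec_read_md_by_pmid; infer_instance

-- ===== CLAIM (what is proved, stated in full; the proofs are below) =====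
def Claim_equal_read_md_by_pmid : Prop := ∀ (content : String), Dom_read_md_by_pmid content → Spec_read_md_by_pmid content (read_md_by_pmid content)

-- ===== LEMMAS AND PROOFS =====

-- A's `current_block += line + '\n'` accumulation over a body, as one concatenation
def pvCat (bs : List (List Char)) : List Char := bs.foldr (fun l acc => l ++ '\n' :: acc) []

theorem pvCat_nil : pvCat [] = [] := rfl

theorem pvCat_cons (x : List Char) (t : List (List Char)) :
    pvCat (x :: t) = x ++ '\n' :: pvCat t := rfl

theorem pvRstrip_nl (t : List Char) : PySem.Chars.rstrip (t ++ ['\n']) = PySem.Chars.rstrip t := by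
  simp [PySem.Chars.rstrip, PySem.Chars.isspace]

theorem pvStrip_nl (s : List Char) : PySem.Chars.strip (s ++ ['\n']) = PySem.Chars.strip s := by
  simp only [PySem.Chars.strip, PySem.Chars.lstrip, List.dropWhile_append]
  split
  · next h =>
    have : List.dropWhile PySem.Chars.isspace ['\n'] = [] := by decide
    simp [this, List.isEmpty_iff.mp h]
  · next h => exact pvRstrip_nl _

theorem pvCat_eq_join (bs : List (List Char)) (h : bs ≠ []) :
    pvCat bs = PySem.Chars.join ['\n'] bs ++ ['\n'] := by
  induction bs with
  | nil => simp at h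
  | cons x t ih =>
    cases t with
    | nil => simp [pvCat_cons, pvCat_nil, PySem.Chars.join_singleton]
    | cons y u =>
      rw [PySem.Chars.join_cons_cons, pvCat_cons, ih (by simp)]
      simp

theorem pvStrip_cat (bs : List (List Char)) :
    PySem.Chars.strip (pvCat bs) = PySem.Chars.strip (PySem.Chars.join ['\n'] bs) := by
  cases bs with
  | nil => rfl
  | cons x t => rw [pvCat_eq_join _ (by simp), pvStrip_nl]

theorem pvGoB_nil : pvGoB [] = [] := by simp [pvGoB]

theorem pvGoB_cons (l : List Char) (rest : List (List Char)) :
    pvGoB (l :: rest) =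
      (String.ofList (PySem.List.slice l (some 9) none),
       String.ofList (PySem.Chars.strip
          (PySem.Chars.join ['\n'] (rest.takeWhile (fun x => ! PySem.Chars.startswith x pvHdr))) ++ ['\n']))
        :: pvGoB (rest.dropWhile (fun x => ! PySem.Chars.startswith x pvHdr)) := by
  simp [pvGoB]

theorem pvLoopSome (lines : List (List Char)) :
    ∀ (res : List (String × String)) (p b : List Char),
    pvFlushA (lines.foldl pvStepA (res, some (p, b))) =
      res ++ (String.ofList p,
              String.ofList (PySem.Chars.strip
                (b ++ pvCat (lines.takeWhile (fun x => ! PySem.Chars.startswith x pvHdr))) ++ ['\n']))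
          :: pvGoB (lines.dropWhile (fun x => ! PySem.Chars.startswith x pvHdr)) := by
  induction lines with
  | nil => intro res p b; simp [pvFlushA, pvCat_nil, pvGoB_nil]
  | cons l rest ih =>
    intro res p b
    by_cases h : PySem.Chars.startswith l pvHdr
    · have stepEq : pvStepA (res, some (p, b)) l =
        (res ++ [(String.ofList p, String.ofList (PySem.Chars.strip b ++ ['\n']))],
         some (PySem.List.slice l (some 9) none, [])) := by
        simp [pvStepA, h]
      rw [List.foldl_cons, stepEq, ih]
      rw [List.takeWhile_cons, List.dropWhile_cons]
      simp only [h, Bool.not_true, if_neg (by simp : ¬ (false = true))]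
      rw [pvGoB_cons, pvCat_nil]
      simp [pvStrip_cat]
    · have hsw : PySem.Chars.startswith l pvHdr = false := by simpa using h
      have stepEq : pvStepA (res, some (p, b)) l = (res, some (p, b ++ l ++ ['\n'])) := by
        simp [pvStepA, hsw]
      rw [List.foldl_cons, stepEq, ih]
      rw [List.takeWhile_cons, List.dropWhile_cons]
      simp [hsw, pvCat_cons]

theorem pvLoopNone (lines : List (List Char)) :
    ∀ (res : List (String × String)),
    pvFlushA (lines.foldl pvStepA (res, none)) =
      res ++ pvGoB (lines.dropWhile (fun l => ! PySem.Chars.startswith l pvHdr)) := by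
  induction lines with
  | nil => intro res; simp [pvFlushA, pvGoB_nil]
  | cons l rest ih =>
    intro res
    by_cases h : PySem.Chars.startswith l pvHdr
    · have stepEq : pvStepA (res, none) l =
        (res, some (PySem.List.slice l (some 9) none, [])) := by
        simp [pvStepA, h]
      rw [List.foldl_cons, stepEq, pvLoopSome]
      rw [List.dropWhile_cons]
      simp only [h, Bool.not_true, if_neg (by simp : ¬ (false = true))]
      rw [pvGoB_cons]
      simp [pvStrip_cat]
    · have hsw : PySem.Chars.startswith l pvHdr = false := by simpa using h
      have stepEq : pvStepA (res, none) l = (res, none) := by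
        simp [pvStepA, hsw]
      rw [List.foldl_cons, stepEq, List.dropWhile_cons]
      simp only [hsw, Bool.not_false, if_pos]
      exact ih res

-- ===== VERDICT (by name: the statement is the Claim_ definition above) =====
theorem read_md_by_pmid_spec : Claim_equal_read_md_by_pmid := by
  intro content _
  show read_md_by_pmid content = read_md_by_pmid_alt content
  unfold read_md_by_pmid read_md_by_pmid_alt
  rw [pvLoopNone]
  simp
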